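-- pv_equiv track=rewrite | github.com/AdamVendrasco/HSCP_MC_Generation | scripts/Mini_Nano_scripts/check_gen_rhadrons.py | _normalize_dataset_string
-- ===== SOURCE A (Python) =====
-- def _normalize_dataset_string(s: str) -> str:
--     s = (s or "").strip()
--     if "dataset=" in s:
--         idx = s.find("dataset=") + len("dataset=")
--         rest = s[idx:].lstrip(' "\'')
--         end = len(rest)
--         for sep in ['"', "'", " "]:
--             pos = rest.find(sep)
--             if pos != -1:
--                 end = min(end, pos)
--         s = rest[:end].strip()
--
--     if s.startswith("file dataset="):
--         s = s[len("file dataset="):].strip()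
--
--     return s
-- ===== SOURCE B (Python) =====
-- def _normalize_dataset_string(s: str) -> str:
--     s = (s or "").strip()
--     head, found, rest = s.partition("dataset=")
--     if not found:
--         return s
--     token = []
--     for c in rest.lstrip(' "\''):
--         if c in ' "\'':
--             break
--         token.append(c)
--     return ''.join(token).strip()
-- ===== Notes on version B (the rewrite author's own statement) =====
-- stated objective: simpler
-- what changed: B splits the stripped input once with str.partition at the marker substring and cuts the token with a single forward scan that breaks at the first quote or space, replacing A's separate in-test, manual find-plus-slice, three find calls folded through min, and A's unreachable final startswith branch.
import Mathlib
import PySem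

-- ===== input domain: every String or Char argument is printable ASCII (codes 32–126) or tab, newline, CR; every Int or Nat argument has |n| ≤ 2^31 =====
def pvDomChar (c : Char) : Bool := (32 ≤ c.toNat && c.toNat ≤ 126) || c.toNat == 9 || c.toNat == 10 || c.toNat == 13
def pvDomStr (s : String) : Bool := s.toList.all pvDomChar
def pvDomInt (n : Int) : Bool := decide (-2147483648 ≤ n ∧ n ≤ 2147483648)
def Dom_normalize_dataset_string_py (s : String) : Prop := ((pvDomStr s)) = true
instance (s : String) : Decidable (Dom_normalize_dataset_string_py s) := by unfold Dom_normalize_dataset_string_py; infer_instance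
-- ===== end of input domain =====

-- B replaces A's in-test / manual find+slice / three find calls with a running min / dead
-- 'file dataset=' branch by one partition at 'dataset=' and a single forward scan with break (simpler).

-- ===== PORT A =====
-- membership test `c in ' "\''` (same character set in A's lstrip and its sep loop)
def pvSep (c : Char) : Bool := c ∈ ([' ', '"', '\''] : List Char)

-- body of A's `for sep in ['"', "'", " "]` loop: `pos = rest.find(sep); if pos != -1: end = min(end, pos)`
def pvStep (r : List Char) (e : Int) (sep : Char) : Int :=
  let pos := PySem.Chars.find r [sep]
  if pos ≠ -1 then min e pos else e

def normalize_dataset_string_py (s : String) : String :=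
  let s0 : String := if s = "" then "" else s        -- `s or ""`
  let t := PySem.Chars.strip s0.toList
  let t2 :=
    if PySem.Chars.isIn "dataset=".toList t = true then
      let idx : Int := PySem.Chars.find t "dataset=".toList + 8   -- len("dataset=") = 8
      -- `.lstrip(' "\'')` is exactly dropWhile of membership in that character set
      let rest := (PySem.Chars.slice t (some idx) none).dropWhile pvSep
      let e : Int := (['"', '\'', ' '] : List Char).foldl (pvStep rest) (rest.length : Int)
      PySem.Chars.strip (PySem.Chars.slice rest none (some e))
    else t
  let t3 :=
    if PySem.Chars.startswith t2 "file dataset=".toList then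
      PySem.Chars.strip (PySem.Chars.slice t2 (some 13) none)     -- len("file dataset=") = 13
    else t2
  String.ofList t3

-- ===== PORT B =====
-- B's `for c in …: if c in ' "\'': break; token.append(c)` loop
def pvCollect : List Char → List Char
  | [] => []
  | c :: cs => if pvSep c then [] else c :: pvCollect cs

def normalize_dataset_string_py_alt (s : String) : String :=
  let t := PySem.Chars.strip ((if s = "" then "" else s).toList)   -- (s or "").strip()
  let f := PySem.Chars.find t "dataset=".toList                    -- partition: first occurrence
  if f = -1 then String.ofList t
  else
    let rest := (t.drop (f.toNat + 8)).dropWhile pvSep             -- after-part, lstrip(' "\'')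
    String.ofList (PySem.Chars.strip (pvCollect rest))

-- ===== PRECONDITION & SPEC =====
def Spec_normalize_dataset_string_py (s : String) (out : String) : Prop := out = normalize_dataset_string_py_alt s
instance (s : String) (out : String) : Decidable (Spec_normalize_dataset_string_py s out) := by unfold Spec_normalize_dataset_string_py; infer_instance

-- ===== CLAIM (what is proved, stated in full; the proofs are below) =====
def Claim_equal_normalize_dataset_string_py : Prop := ∀ (s : String), Dom_normalize_dataset_string_py s → Spec_normalize_dataset_string_py s (normalize_dataset_string_py s)

-- ===== LEMMAS AND PROOFS =====

-- [c] is a prefix of `l.drop i` iff l[i]? = some c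
theorem pv_singleton_prefix_drop (l : List Char) (i : Nat) (c : Char) :
    ([c] <+: l.drop i) ↔ l[i]? = some c := by
  rw [List.cons_prefix_iff, ← List.head?_drop]
  constructor
  · rintro ⟨l', h, -⟩; simp [h]
  · intro h
    cases hd : l.drop i with
    | nil => simp [hd] at h
    | cons a as => rw [hd] at h; simp at h; exact ⟨as, by simp [h], List.nil_prefix⟩

-- full spec of Chars.find on a singleton pattern
theorem pv_find_cases (r : List Char) (c : Char) :
    (PySem.Chars.find r [c] = -1 ∧ c ∉ r) ∨
    (∃ k : ℕ, PySem.Chars.find r [c] = (k : ℤ) ∧ k < r.length ∧ r[k]? = some c ∧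
      ∀ i < k, r[i]? ≠ some c) := by
  by_cases h : PySem.Chars.find r [c] = -1
  · left
    refine ⟨h, fun hmem => ?_⟩
    have hinf : [c] <:+: r := by
      obtain ⟨p, q, hpq⟩ := List.append_of_mem hmem
      exact ⟨p, q, by simp [hpq]⟩
    rw [PySem.Chars.find_eq_neg_one_iff] at h
    exact h hinf
  · right
    have h0 : PySem.Chars.findFrom r [c] ((0:ℕ) : ℤ) = PySem.Chars.find r [c] := by
      simpa using PySem.Chars.findFrom_zero r [c]
    obtain ⟨hle, hpre, hmin⟩ :=
      PySem.Chars.findFrom_natCast_spec r [c] 0 (Nat.zero_le _) (by rw [h0]; exact h)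
    rw [h0] at hle hpre hmin
    refine ⟨(PySem.Chars.find r [c]).toNat, (Int.toNat_of_nonneg (by simpa using hle)).symm, ?_, ?_, ?_⟩
    · have := (pv_singleton_prefix_drop r _ c).mp hpre
      have := List.getElem?_eq_some_iff.mp this
      exact this.1
    · exact (pv_singleton_prefix_drop r _ c).mp hpre
    · intro i hi hsome
      exact hmin i (Nat.zero_le _) hi ((pv_singleton_prefix_drop r i c).mpr hsome)

-- lower bound: each loop step stays ≥ the first separator position w
theorem pv_step_lower (r : List Char) (e : Int) (c : Char) (hc : pvSep c = true)
    (h : (r.findIdx pvSep : Int) ≤ e) : (r.findIdx pvSep : Int) ≤ pvStep r e c := by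
  unfold pvStep
  rcases pv_find_cases r c with ⟨hneg, -⟩ | ⟨k, hk, hklen, hget, -⟩
  · simp [hneg, h]
  · have hwk : r.findIdx pvSep ≤ k := by
      by_contra hlt'
      have hlt := Nat.lt_of_not_le hlt'
      have h5 : pvSep r[k] = false := List.not_of_lt_findIdx hlt
      have h8 : r[k]? = some r[k] := List.getElem?_eq_getElem hklen
      have h6 : c = r[k] := Option.some.inj (hget.symm.trans h8)
      rw [h6] at hc
      exact Bool.false_ne_true (h5.symm.trans hc)
    dsimp only
    simp only [hk]
    split
    · omega
    · exact h

-- each loop step only decreases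
theorem pv_step_le (r : List Char) (e : Int) (c : Char) : pvStep r e c ≤ e := by
  unfold pvStep
  dsimp only
  split
  · exact min_le_left _ _
  · exact le_rfl

-- if the separator c occurs first at overall position w, the step caps e at ≤ w
theorem pv_step_hit (r : List Char) (e : Int) (c : Char) (w : ℕ)
    (hw : r[w]? = some c) : pvStep r e c ≤ (w : Int) := by
  rcases pv_find_cases r c with ⟨-, hmem⟩ | ⟨k, hk, -, -, hmin⟩
  · exact absurd (List.mem_of_getElem? hw) hmem
  · have hkw : k ≤ w := by
      by_contra hlt'
      have hlt := Nat.lt_of_not_le hlt'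
      exact hmin w hlt hw
    unfold pvStep
    dsimp only
    simp only [hk]
    split
    · have : min e (k : Int) ≤ (k : Int) := min_le_right _ _
      omega
    · omega

-- A's folded `end` value is exactly the index of the first separator char (or the length)
theorem pv_fold_eq (r : List Char) :
    (['"', '\'', ' '] : List Char).foldl (pvStep r) (r.length : Int) = (r.findIdx pvSep : Int) := by
  set w := r.findIdx pvSep with hwdef
  have hwle : w ≤ r.length := List.findIdx_le_length
  simp only [List.foldl_cons, List.foldl_nil]
  set e1 := pvStep r (r.length : Int) '"' with he1
  set e2 := pvStep r e1 '\'' with he2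
  have hlow : (w : Int) ≤ pvStep r e2 ' ' := by
    apply pv_step_lower r _ _ (by decide)
    apply pv_step_lower r _ _ (by decide)
    apply pv_step_lower r _ _ (by decide)
    exact_mod_cast hwle
  have hup : pvStep r e2 ' ' ≤ (w : Int) := by
    by_cases hwn : w < r.length
    · have hP : pvSep r[w] = true := List.findIdx_getElem (w := hwn)
      have hget : r[w]? = some r[w] := List.getElem?_eq_getElem hwn
      have : r[w] = '"' ∨ r[w] = '\'' ∨ r[w] = ' ' := by
        unfold pvSep at hP; simp at hP; tauto
      rcases this with h | h | h
      · calc pvStep r e2 ' ' ≤ e2 := pv_step_le _ _ _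
          _ ≤ e1 := pv_step_le _ _ _
          _ ≤ (w : Int) := pv_step_hit r _ '"' w (h ▸ hget)
      · calc pvStep r e2 ' ' ≤ e2 := pv_step_le _ _ _
          _ ≤ (w : Int) := pv_step_hit r _ '\'' w (h ▸ hget)
      · exact pv_step_hit r _ ' ' w (h ▸ hget)
    · have hwn' : w = r.length := le_antisymm hwle (le_of_not_gt hwn)
      have : pvStep r e2 ' ' ≤ (r.length : Int) :=
        le_trans (pv_step_le _ _ _) (le_trans (pv_step_le _ _ _) (pv_step_le _ _ _))
      omega
  omega

-- B's break-loop is takeWhile of the negated separator test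
theorem pv_collect_eq_takeWhile (l : List Char) :
    pvCollect l = l.takeWhile (fun c => !pvSep c) := by
  induction l with
  | nil => rfl
  | cons c cs ih =>
      by_cases h : pvSep c = true
      · simp [pvCollect, h]
      · simp only [Bool.not_eq_true] at h
        simp [pvCollect, h, ih]

-- membership survives strip (strip only removes characters)
theorem pv_mem_strip (l : List Char) (x : Char) (h : x ∈ PySem.Chars.strip l) : x ∈ l := by
  unfold PySem.Chars.strip PySem.Chars.rstrip at h
  have h1 : x ∈ (PySem.Chars.lstrip l).reverse :=
    (List.dropWhile_sublist (p := PySem.Chars.isspace)).subset (List.mem_reverse.mp h)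
  exact (List.dropWhile_sublist (p := PySem.Chars.isspace)).subset (List.mem_reverse.mp h1)

-- ===== VERDICT helper: the main equality =====
theorem pv_main (s : String) :
    normalize_dataset_string_py s = normalize_dataset_string_py_alt s := by
  unfold normalize_dataset_string_py normalize_dataset_string_py_alt
  dsimp only
  set t := PySem.Chars.strip ((if s = "" then "" else s) : String).toList with ht
  by_cases h : PySem.Chars.find t "dataset=".toList = -1
  · have hin : PySem.Chars.isIn "dataset=".toList t = false := by
      rw [PySem.Chars.isIn_eq_false_iff]
      exact (PySem.Chars.find_eq_neg_one_iff t _).mp h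
    have hsw : PySem.Chars.startswith t "file dataset=".toList = false := by
      by_contra hsw
      simp only [Bool.not_eq_false] at hsw
      have hpre : "file dataset=".toList <+: t := (PySem.Chars.startswith_iff _ _).mp hsw
      have hinf : "dataset=".toList <:+: t :=
        List.IsInfix.trans (by decide) hpre.isInfix
      rw [PySem.Chars.find_eq_neg_one_iff] at h
      exact h hinf
    rw [if_pos h, hin]
    simp only [Bool.false_eq_true, if_false, hsw]
  · have hnn : 0 ≤ PySem.Chars.find t "dataset=".toList := by
      rw [PySem.Chars.find_nonneg_iff]
      by_contra hc
      exact h ((PySem.Chars.find_eq_neg_one_iff t _).mpr hc)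
    have hin : PySem.Chars.isIn "dataset=".toList t = true := by
      rw [PySem.Chars.isIn_iff_infix]
      by_contra hc
      exact h ((PySem.Chars.find_eq_neg_one_iff t _).mpr hc)
    set f := PySem.Chars.find t "dataset=".toList with hf
    have hslice : PySem.Chars.slice t (some (f + 8)) none = t.drop (f.toNat + 8) := by
      rw [PySem.Chars.slice_eq_listSlice, PySem.List.slice_from t (by omega)]
      congr 1
      omega
    set rest := (t.drop (f.toNat + 8)).dropWhile pvSep with hrest
    have htw : PySem.Chars.slice rest none
        (some ((['"', '\'', ' '] : List Char).foldl (pvStep rest) (rest.length : Int)))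
        = rest.takeWhile (fun c => !pvSep c) := by
      rw [pv_fold_eq rest, PySem.Chars.slice_eq_listSlice,
        PySem.List.slice_to rest (Int.natCast_nonneg _)]
      rw [List.takeWhile_eq_take_findIdx_not]
      simp
    have hnospace : ' ' ∉ PySem.Chars.strip (rest.takeWhile (fun c => !pvSep c)) := by
      intro hmem
      have h1 : ' ' ∈ rest.takeWhile (fun c => !pvSep c) := pv_mem_strip _ _ hmem
      have := List.mem_takeWhile_imp h1
      simp [pvSep] at this
    have hsw : PySem.Chars.startswith
        (PySem.Chars.strip (rest.takeWhile (fun c => !pvSep c)))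
        "file dataset=".toList = false := by
      by_contra hsw
      simp only [Bool.not_eq_false] at hsw
      have hpre := (PySem.Chars.startswith_iff _ _).mp hsw
      exact hnospace (List.IsPrefix.mem (by decide) hpre)
    rw [if_neg h, hin, hslice, ← hrest]
    simp only [if_true, htw, hsw, Bool.false_eq_true, if_false, pv_collect_eq_takeWhile]

-- ===== VERDICT (by name: the statement is the Claim_ definition above) =====
theorem normalize_dataset_string_py_spec : Claim_equal_normalize_dataset_string_py := by
  intro s _
  unfold Spec_normalize_dataset_string_py
  exact pv_main s
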